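-- pv_equiv track=rewrite | github.com/mtnleo/MoureDev_code_challenges | Where's the robot/main.py | get_robot_pos
-- ===== SOURCE A (Python) =====
-- def is_neg(number, signed):
--     if signed == True:
--         number = number * (-1)
--         signed = False
--     else:
--         signed = True
--
--     return number, signed
--
-- def get_robot_pos(steps):
--     coords = [0, 0] # initial coords
--     x_turn = False # kind of like a semaphore
--
--     x_neg = True     # because he starts walking to the negative part of x
--     y_neg = False    # "" to the positive part of y
--
--     for walk in steps: # we change the coordinate he's modifying per iteration
--         if x_turn == False:
--             y = walk
--
--             y, y_neg = is_neg(y, y_neg)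
--
--             coords[1] += y
--             x_turn = True
--         else:
--             x = walk
--
--             x, x_neg = is_neg(x, x_neg)
--
--             coords[0] += x
--             x_turn = False
--
--     return coords
-- ===== SOURCE B (Python) =====
-- def altsum(xs):
--     """Alternating sum xs[0] - xs[1] + xs[2] - ..."""
--     total = 0
--     sign = 1
--     for v in xs:
--         total += sign * v
--         sign = -sign
--     return total
--
-- def get_robot_pos(steps):
--     y = altsum(steps[0::2])   # even-index steps feed y, starting positive
--     x = -altsum(steps[1::2])  # odd-index steps feed x, starting negative
--     return [x, y]
-- ===== Notes on version B (the rewrite author's own statement) =====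
-- stated objective: simpler
-- what changed: Replaces the single interleaved loop with mutable turn/sign flags by two parity slices, each reduced with a plain alternating-sum helper.
import Mathlib
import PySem

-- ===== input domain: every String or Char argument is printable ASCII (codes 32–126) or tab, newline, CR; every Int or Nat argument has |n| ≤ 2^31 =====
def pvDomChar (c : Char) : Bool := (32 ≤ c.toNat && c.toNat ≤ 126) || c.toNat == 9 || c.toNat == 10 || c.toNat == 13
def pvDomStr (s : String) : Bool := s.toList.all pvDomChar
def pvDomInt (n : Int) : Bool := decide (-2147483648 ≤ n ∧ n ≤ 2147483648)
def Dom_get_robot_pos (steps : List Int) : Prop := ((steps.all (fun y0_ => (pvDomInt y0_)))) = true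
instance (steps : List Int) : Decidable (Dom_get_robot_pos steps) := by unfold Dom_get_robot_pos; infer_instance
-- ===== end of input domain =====

-- B replaces A's single interleaved loop with mutable turn/sign flags by two parity
-- slices each reduced with a plain alternating-sum helper (objective: simpler).

-- ===== PORT A =====
def is_neg (number : Int) (signed : Bool) : Int × Bool :=
  if signed = true then (number * (-1), false) else (number, true)

-- the body of A's for-loop over state (coords[0], coords[1], x_turn, x_neg, y_neg)
def pvLoopBodyA (s : Int × Int × Bool × Bool × Bool) (walk : Int) :
    Int × Int × Bool × Bool × Bool :=
  match s with
  | (c0, c1, x_turn, x_neg, y_neg) =>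
    if x_turn = false then
      let p := is_neg walk y_neg
      (c0, c1 + p.1, true, x_neg, p.2)
    else
      let p := is_neg walk x_neg
      (c0 + p.1, c1, false, p.2, y_neg)

def get_robot_pos (steps : List Int) : List Int :=
  let st := steps.foldl pvLoopBodyA (0, 0, false, true, false)
  [st.1, st.2.1]

-- ===== PORT B =====
-- hand port of the extended slice xs[0::2] (every second element from index 0;
-- exact for step 2 and nonnegative start); xs[1::2] is takeEvery2 xs.tail
def takeEvery2 : List Int → List Int
  | [] => []
  | [a] => [a]
  | a :: _ :: r => a :: takeEvery2 r

-- B's altsum loop: total += sign * v; sign = -sign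
def altsum (xs : List Int) : Int :=
  (xs.foldl (fun (st : Int × Int) v => (st.1 + st.2 * v, -st.2)) (0, 1)).1

def get_robot_pos_alt (steps : List Int) : List Int :=
  let y := altsum (takeEvery2 steps)
  let x := -(altsum (takeEvery2 steps.tail))
  [x, y]

-- ===== PRECONDITION & SPEC =====
def Spec_get_robot_pos (steps : List Int) (out : List Int) : Prop := out = get_robot_pos_alt steps
instance (steps : List Int) (out : List Int) : Decidable (Spec_get_robot_pos steps out) := by unfold Spec_get_robot_pos; infer_instance

-- ===== CLAIM (what is proved, stated in full; the proofs are below) =====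
def Claim_equal_get_robot_pos : Prop := ∀ (steps : List Int), Dom_get_robot_pos steps → Spec_get_robot_pos steps (get_robot_pos steps)

-- ===== LEMMAS AND PROOFS =====

-- plain alternating sum, the common characterisation of both programs
def pvAlt : List Int → Int
  | [] => 0
  | a :: xs => a - pvAlt xs

def pvEps (b : Bool) : Int := if b then -1 else 1

theorem takeEvery2_cons (a : Int) (r : List Int) :
    takeEvery2 (a :: r) = a :: takeEvery2 r.tail := by
  cases r <;> simp [takeEvery2]

theorem altsum_fold (xs : List Int) : ∀ (s sign : Int),
    (xs.foldl (fun (st : Int × Int) v => (st.1 + st.2 * v, -st.2)) (s, sign)).1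
      = s + sign * pvAlt xs := by
  induction xs with
  | nil => intro s sign; simp [pvAlt]
  | cons a r ih =>
      intro s sign
      simp only [List.foldl_cons, pvAlt, ih]
      ring

theorem altsum_eq (xs : List Int) : altsum xs = pvAlt xs := by
  simpa using altsum_fold xs 0 1

theorem foldA_char (steps : List Int) : ∀ (c0 c1 : Int) (t xn yn : Bool),
    (steps.foldl pvLoopBodyA (c0, c1, t, xn, yn)).1
      = c0 + pvEps xn * pvAlt (if t then takeEvery2 steps else takeEvery2 steps.tail)
    ∧ (steps.foldl pvLoopBodyA (c0, c1, t, xn, yn)).2.1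
      = c1 + pvEps yn * pvAlt (if t then takeEvery2 steps.tail else takeEvery2 steps) := by
  induction steps with
  | nil => intro c0 c1 t xn yn; cases t <;> simp [takeEvery2, pvAlt]
  | cons a r ih =>
      intro c0 c1 t xn yn
      cases t with
      | false =>
          cases yn with
          | false =>
              have h := ih c0 (c1 + a) true xn true
              simp [pvLoopBodyA, is_neg, takeEvery2_cons, pvAlt, pvEps] at h ⊢
              exact ⟨by linarith [h.1], by linarith [h.2]⟩
          | true =>
              have h := ih c0 (c1 + a * (-1)) true xn false
              simp [pvLoopBodyA, is_neg, takeEvery2_cons, pvAlt, pvEps] at h ⊢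
              exact ⟨by linarith [h.1], by linarith [h.2]⟩
      | true =>
          cases xn with
          | false =>
              have h := ih (c0 + a) c1 false true yn
              simp [pvLoopBodyA, is_neg, takeEvery2_cons, pvAlt, pvEps] at h ⊢
              exact ⟨by linarith [h.1], by linarith [h.2]⟩
          | true =>
              have h := ih (c0 + a * (-1)) c1 false false yn
              simp [pvLoopBodyA, is_neg, takeEvery2_cons, pvAlt, pvEps] at h ⊢
              exact ⟨by linarith [h.1], by linarith [h.2]⟩

-- ===== VERDICT (by name: the statement is the Claim_ definition above) =====
theorem get_robot_pos_spec : Claim_equal_get_robot_pos := by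
  intro steps _
  show get_robot_pos steps = get_robot_pos_alt steps
  have h := foldA_char steps 0 0 false true false
  simp only [pvEps, reduceIte] at h
  simp only [get_robot_pos, get_robot_pos_alt, altsum_eq, h.1, h.2]
  norm_num
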